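-- pv_equiv track=rewrite | github.com/kawasakixd/ZKI_project | back/lr_5.py | get_crypto_char
-- ===== SOURCE A (Python) =====
-- matrix = [['a', 'b', 'c', 'd', 'e'],
--           ['f', 'g', 'h', 'i', 'k'],
--           ['l', 'm', 'n', 'o', 'p'],
--           ['q', 'r', 's', 't', 'u'],
--           ['v', 'w', 'x', 'y', 'z']]
--
-- matrixHeight = len(matrix)
--
-- matrixWidth = len(matrix[0])
--
-- def get_crypto_char(char, cipher=True):
--     for indexHeight in range(0, matrixHeight):
--         for indexWidth in range(0, matrixWidth):
--             if char == matrix[indexHeight][indexWidth]: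
--                 if cipher:
--                     return matrix[(indexHeight + 1) % matrixHeight][indexWidth]
--                 else:
--                     return matrix[(indexHeight - 1) % matrixHeight][indexWidth]
--     return char
-- ===== SOURCE B (Python) =====
-- def get_crypto_char(char, cipher=True):
--     # Pure character-code arithmetic: no table, no scan.
--     # The Polybius square is the alphabet without 'j' laid out in rows of 5,
--     # so moving one row down/up is shifting the linear index by +/-5 mod 25.
--     if len(char) != 1 or not ('a' <= char <= 'z') or char == 'j':
--         return char
--     i = ord(char) - ord('a')
--     if i > 9:
--         i -= 1  # collapse the gap left by the missing 'j'
--     i = (i + 5) % 25 if cipher else (i - 5) % 25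
--     if i >= 9:
--         i += 1  # re-open the gap
--     return chr(ord('a') + i)
-- ===== Notes on version B (the rewrite author's own statement) =====
-- stated objective: alternative
-- what changed: Drops the 5x5 matrix entirely: B classifies the character by a range test on its code point and computes the shifted letter by ord/chr arithmetic (collapse the 'j' gap, shift the linear index by +/-5 mod 25, re-open the gap), with no table and no scan.
import Mathlib
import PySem

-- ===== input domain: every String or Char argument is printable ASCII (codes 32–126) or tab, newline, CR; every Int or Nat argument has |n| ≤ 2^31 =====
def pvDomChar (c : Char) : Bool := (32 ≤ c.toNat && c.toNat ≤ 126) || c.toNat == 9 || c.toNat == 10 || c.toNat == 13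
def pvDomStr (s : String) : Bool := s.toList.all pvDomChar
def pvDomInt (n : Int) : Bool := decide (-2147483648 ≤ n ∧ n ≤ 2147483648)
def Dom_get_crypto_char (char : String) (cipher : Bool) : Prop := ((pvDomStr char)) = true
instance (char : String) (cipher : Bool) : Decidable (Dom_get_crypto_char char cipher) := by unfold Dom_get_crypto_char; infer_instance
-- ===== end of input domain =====

-- B drops the 5x5 matrix entirely and computes the shifted letter by ord/chr code-point
-- arithmetic (range test, collapse the 'j' gap, shift by ±5 mod 25, re-open the gap).

-- ===== PORT A =====
def matrixA : List (List String) :=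
  [["a", "b", "c", "d", "e"],
   ["f", "g", "h", "i", "k"],
   ["l", "m", "n", "o", "p"],
   ["q", "r", "s", "t", "u"],
   ["v", "w", "x", "y", "z"]]

def matrixHeightA : Int := matrixA.length

def matrixWidthA : Int := ((PySem.List.pyGet? matrixA 0).getD []).length

-- matrix[i][j]; indices produced by A are always in range, so the defaults are never used
def mgetA (i j : Int) : String :=
  (PySem.List.pyGet? ((PySem.List.pyGet? matrixA i).getD []) j).getD ""

def get_crypto_char (char : String) (cipher : Bool) : String :=
  ((PySem.List.pyRange 0 matrixHeightA 1).foldl (fun acc indexHeight =>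
    (PySem.List.pyRange 0 matrixWidthA 1).foldl (fun acc2 indexWidth =>
      match acc2 with
      | some r => some r   -- already returned
      | none =>
        if char == mgetA indexHeight indexWidth then
          some (if cipher then
                  mgetA (PySem.Int.mod (indexHeight + 1) matrixHeightA) indexWidth
                else
                  mgetA (PySem.Int.mod (indexHeight - 1) matrixHeightA) indexWidth)
        else none) acc) none).getD char

-- ===== PORT B =====
-- Faithful to Source B: the len(char)==1 test is the [c] pattern; on a one-char string
-- Python's 'a' <= char <= 'z' and char == 'j' are exactly the same comparisons on c.
def get_crypto_char_alt (char : String) (cipher : Bool) : String :=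
  match char.toList with
  | [c] =>
    if 'a' ≤ c ∧ c ≤ 'z' ∧ c ≠ 'j' then
      let i : Int := (c.toNat : Int) - 97
      let i := if i > 9 then i - 1 else i            -- collapse the 'j' gap
      let i := if cipher then PySem.Int.mod (i + 5) 25 else PySem.Int.mod (i - 5) 25
      let i := if i ≥ 9 then i + 1 else i            -- re-open the gap
      String.ofList [Char.ofNat (97 + i.toNat)]
    else char
  | _ => char

-- ===== PRECONDITION & SPEC =====
def Spec_get_crypto_char (char : String) (cipher : Bool) (out : String) : Prop := out = get_crypto_char_alt char cipher
instance (char : String) (cipher : Bool) (out : String) : Decidable (Spec_get_crypto_char char cipher out) := by unfold Spec_get_crypto_char; infer_instance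

-- ===== CLAIM (what is proved, stated in full; the proofs are below) =====
def Claim_equal_get_crypto_char : Prop := ∀ (char : String) (cipher : Bool), Dom_get_crypto_char char cipher → Spec_get_crypto_char char cipher (get_crypto_char char cipher)

-- ===== LEMMAS AND PROOFS =====

-- the 25 strings A can match (proof-side helper only)
def tableL : List String :=
  ["a","b","c","d","e","f","g","h","i","k","l","m","n","o","p","q","r","s","t","u","v","w","x","y","z"]

lemma A_not_mem (char : String) (cipher : Bool) (h : char ∉ tableL) :
    get_crypto_char char cipher = char := by
  simp only [tableL, List.mem_cons, List.not_mem_nil, or_false, not_or] at h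
  obtain ⟨h1,h2,h3,h4,h5,h6,h7,h8,h9,h10,h11,h12,h13,h14,h15,h16,h17,h18,h19,h20,h21,h22,h23,h24,h25⟩ := h
  have hr : PySem.List.pyRange 0 matrixHeightA 1 = [0, 1, 2, 3, 4] := by decide
  have hw : PySem.List.pyRange 0 matrixWidthA 1 = [0, 1, 2, 3, 4] := by decide
  have m00 : mgetA 0 0 = "a" := by decide
  have m01 : mgetA 0 1 = "b" := by decide
  have m02 : mgetA 0 2 = "c" := by decide
  have m03 : mgetA 0 3 = "d" := by decide
  have m04 : mgetA 0 4 = "e" := by decide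
  have m10 : mgetA 1 0 = "f" := by decide
  have m11 : mgetA 1 1 = "g" := by decide
  have m12 : mgetA 1 2 = "h" := by decide
  have m13 : mgetA 1 3 = "i" := by decide
  have m14 : mgetA 1 4 = "k" := by decide
  have m20 : mgetA 2 0 = "l" := by decide
  have m21 : mgetA 2 1 = "m" := by decide
  have m22 : mgetA 2 2 = "n" := by decide
  have m23 : mgetA 2 3 = "o" := by decide
  have m24 : mgetA 2 4 = "p" := by decide
  have m30 : mgetA 3 0 = "q" := by decide
  have m31 : mgetA 3 1 = "r" := by decide
  have m32 : mgetA 3 2 = "s" := by decide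
  have m33 : mgetA 3 3 = "t" := by decide
  have m34 : mgetA 3 4 = "u" := by decide
  have m40 : mgetA 4 0 = "v" := by decide
  have m41 : mgetA 4 1 = "w" := by decide
  have m42 : mgetA 4 2 = "x" := by decide
  have m43 : mgetA 4 3 = "y" := by decide
  have m44 : mgetA 4 4 = "z" := by decide
  simp only [get_crypto_char, hr, hw, List.foldl, m00, m01, m02, m03, m04, m10, m11, m12, m13, m14, m20, m21, m22, m23, m24, m30, m31, m32, m33, m34, m40, m41, m42, m43, m44]
  simp [h1,h2,h3,h4,h5,h6,h7,h8,h9,h10,h11,h12,h13,h14,h15,h16,h17,h18,h19,h20,h21,h22,h23,h24,h25]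

-- a single lowercase letter other than 'j' is one of the 25 table strings
lemma mem_tableL_of_bounds (c : Char) (h1 : 'a' ≤ c) (h2 : c ≤ 'z') (h3 : c ≠ 'j') :
    String.ofList [c] ∈ tableL := by
  have hlo : 97 ≤ c.toNat := h1
  have hhi : c.toNat ≤ 122 := h2
  have hj : c.toNat ≠ 106 := fun h => h3 (Char.ext (UInt32.toNat_inj.mp h))
  have hc : c = Char.ofNat c.toNat := (Char.ofNat_toNat c).symm
  set n := c.toNat with hn
  rw [hc]
  interval_cases n <;> first | (exact absurd rfl hj) | decide

lemma B_not_mem (char : String) (cipher : Bool) (h : char ∉ tableL) :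
    get_crypto_char_alt char cipher = char := by
  unfold get_crypto_char_alt
  rcases hl : char.toList with _ | ⟨c, _ | ⟨d, cs⟩⟩
  · rfl
  · by_cases hg : 'a' ≤ c ∧ c ≤ 'z' ∧ c ≠ 'j'
    · exfalso
      apply h
      have hch : char = String.ofList [c] := by rw [← hl, String.ofList_toList]
      rw [hch]
      exact mem_tableL_of_bounds c hg.1 hg.2.1 hg.2.2
    · simp only [if_neg hg]
  · rfl

-- ===== VERDICT (by name: the statement is the Claim_ definition above) =====
theorem get_crypto_char_spec : Claim_equal_get_crypto_char := by
  intro char cipher _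
  unfold Spec_get_crypto_char
  by_cases h : char ∈ tableL
  · fin_cases h <;> cases cipher <;> decide
  · rw [A_not_mem char cipher h, B_not_mem char cipher h]
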